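-- pv_equiv track=rewrite | github.com/pcunnin7/Python-Introduction-Assighnments | refactorCelebrity.py | pirate
-- ===== SOURCE A (Python) =====
-- def pirate(quote):
--     out = ''
--     tokens = quote.split(" ")
--     for count, token in enumerate(tokens):
--         for char in token:
--             if char == 'r' or char == 'R':
--                 out = out + "RRR";
--             out = out + char
--         if count < len(tokens) - 1:
--             out = out + " ";
--     return out
-- ===== SOURCE B (Python) =====
-- def pirate(quote):
--     return quote.translate({ord('r'): "RRRr", ord('R'): "RRRR"})
-- ===== Notes on version B (the rewrite author's own statement) =====
-- stated objective: faster
-- what changed: Replaces the split-on-space tokenization with nested loops and quadratic string concatenation by a single str.translate pass over a substitution table, relying on splitting on a single space and rejoining being an identity.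
import Mathlib
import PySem

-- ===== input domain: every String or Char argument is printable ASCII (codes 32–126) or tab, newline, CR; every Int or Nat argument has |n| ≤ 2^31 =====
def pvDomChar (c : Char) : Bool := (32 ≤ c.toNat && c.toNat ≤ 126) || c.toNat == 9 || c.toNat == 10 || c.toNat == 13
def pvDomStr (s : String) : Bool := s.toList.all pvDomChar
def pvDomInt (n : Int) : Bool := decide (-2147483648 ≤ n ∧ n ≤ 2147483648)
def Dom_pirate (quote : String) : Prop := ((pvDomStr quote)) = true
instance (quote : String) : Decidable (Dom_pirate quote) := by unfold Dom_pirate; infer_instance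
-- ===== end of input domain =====

-- B replaces A's split-on-space tokenization with nested loops by a single per-character
-- substitution-table pass (str.translate), avoiding quadratic string concatenation; objective: faster.

-- ===== PORT A =====
-- literal port of A over code points (PySem.Chars, as Lean's own String ops are opaque)
def pirateChars (s : List Char) : List Char :=
  let tokens := PySem.Chars.splitOn s [' ']
  (PySem.List.enumerate tokens).foldl
    (fun out ct =>
      let out := ct.2.foldl
        (fun out char =>
          (if char = 'r' || char = 'R' then out ++ ['R', 'R', 'R'] else out) ++ [char]) out
      if ct.1 < (tokens.length : Int) - 1 then out ++ [' '] else out) []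

def pirate (quote : String) : String := String.ofList (pirateChars quote.toList)

-- ===== PORT B =====
-- the translate table of Source B: what translate substitutes for each character
def pirateTable (c : Char) : List Char :=
  if c = 'r' then ['R', 'R', 'R', 'r']
  else if c = 'R' then ['R', 'R', 'R', 'R']
  else [c]

def pirate_alt (quote : String) : String := String.ofList (quote.toList.flatMap pirateTable)

-- ===== PRECONDITION & SPEC =====
def Spec_pirate (quote : String) (out : String) : Prop := out = pirate_alt quote
instance (quote : String) (out : String) : Decidable (Spec_pirate quote out) := by unfold Spec_pirate; infer_instance

-- ===== CLAIM (what is proved, stated in full; the proofs are below) =====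
def Claim_equal_pirate : Prop := ∀ (quote : String), Dom_pirate quote → Spec_pirate quote (pirate quote)

-- ===== LEMMAS AND PROOFS =====

lemma intercalate_cons {α : Type} (s x : List α) (xs : List (List α)) :
    List.intercalate s (x :: xs) = if xs = [] then x else x ++ s ++ List.intercalate s xs := by
  cases xs <;> simp [List.intercalate, List.intersperse]

lemma intercalate_append_singleton {α : Type} (s y : List α) (xs : List (List α)) :
    List.intercalate s (xs ++ [y])
      = (if xs = [] then [] else List.intercalate s xs ++ s) ++ y := by
  induction xs with
  | nil => simp [List.intercalate]
  | cons x t ih =>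
      rw [List.cons_append, intercalate_cons, ih, intercalate_cons]
      cases t <;> simp

-- the split/join identity: joining splitOn's pieces with the separator restores the string
lemma go_intercalate (sep : List Char) (hsep : sep ≠ []) :
    ∀ (fuel : Nat) (l cur : List Char) (accs : List (List Char)),
      l.length ≤ fuel →
      List.intercalate sep (PySem.Chars.splitOn.go sep fuel l cur accs)
        = (if accs = [] then [] else List.intercalate sep accs.reverse ++ sep)
          ++ cur.reverse ++ l := by
  intro fuel
  induction fuel with
  | zero =>
      intro l cur accs hl
      have : l = [] := List.eq_nil_of_length_eq_zero (Nat.le_zero.mp hl)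
      subst this
      rw [PySem.Chars.splitOn.go, List.append_nil, List.reverse_cons, intercalate_append_singleton]
      cases accs <;> simp
  | succ f ih =>
      intro l cur accs hl
      cases l with
      | nil =>
          rw [PySem.Chars.splitOn.go]
          · rw [List.reverse_cons, intercalate_append_singleton]
            cases accs <;> simp
          · omega
      | cons c rest =>
          rw [PySem.Chars.splitOn.go]
          by_cases hpre : sep.isPrefixOf (c :: rest) = true
          · simp only [hpre, if_true]
            have hp : sep <+: (c :: rest) := List.isPrefixOf_iff_prefix.mp hpre
            obtain ⟨t, ht⟩ := hp
            have hsl : 1 ≤ sep.length := by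
              cases sep with
              | nil => exact absurd rfl hsep
              | cons _ _ => simp
            have hdrop : List.drop sep.length (c :: rest) = t := by
              rw [← ht, List.drop_left]
            have hlen : (List.drop sep.length (c :: rest)).length ≤ f := by
              rw [List.length_drop]
              have : (c :: rest).length ≤ f + 1 := hl
              omega
            rw [ih _ _ _ hlen, hdrop]
            have hccons : (c :: rest) = sep ++ t := ht.symm
            rw [List.reverse_cons, intercalate_append_singleton]
            cases accs <;> simp [hccons]
          · simp only [hpre, Bool.false_eq_true, if_false]
            have hlen : rest.length ≤ f := by
              have : (c :: rest).length ≤ f + 1 := hl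
              simpa using this
            rw [ih _ _ _ hlen]
            simp

lemma intercalate_splitOn (s sep : List Char) (hsep : sep ≠ []) :
    List.intercalate sep (PySem.Chars.splitOn s sep) = s := by
  rw [PySem.Chars.splitOn]
  rw [go_intercalate sep hsep (s.length + 1) s [] [] (by omega)]
  simp

lemma go_ne_nil (sep : List Char) :
    ∀ (fuel : Nat) (l cur : List Char) (accs : List (List Char)),
      PySem.Chars.splitOn.go sep fuel l cur accs ≠ [] := by
  intro fuel
  induction fuel with
  | zero => intro l cur accs; rw [PySem.Chars.splitOn.go]; simp
  | succ f ih =>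
      intro l cur accs
      cases l with
      | nil =>
          rw [PySem.Chars.splitOn.go]
          · simp
          · omega
      | cons c rest =>
          rw [PySem.Chars.splitOn.go]
          by_cases hpre : sep.isPrefixOf (c :: rest) = true
          · simp only [hpre, if_true]; exact ih _ _ _
          · simp only [hpre, Bool.false_eq_true, if_false]; exact ih _ _ _

lemma splitOn_ne_nil (s sep : List Char) : PySem.Chars.splitOn s sep ≠ [] := by
  rw [PySem.Chars.splitOn]; exact go_ne_nil sep _ s [] []

-- A's inner character loop on one token equals the table substitution of that token
lemma inner_fold (t : List Char) :
    ∀ out : List Char,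
      t.foldl (fun out char =>
          (if char = 'r' || char = 'R' then out ++ ['R', 'R', 'R'] else out) ++ [char]) out
        = out ++ t.flatMap pirateTable := by
  induction t with
  | nil => intro out; simp
  | cons c rest ih =>
      intro out
      simp only [List.foldl_cons, List.flatMap_cons, ih]
      by_cases h1 : c = 'r'
      · simp [h1, pirateTable]
      · by_cases h2 : c = 'R'
        · simp [h1, h2, pirateTable]
        · simp [h1, h2, pirateTable]

-- A's outer enumerate loop joins the substituted tokens with single spaces
lemma enum_nil (k : Int) : PySem.List.enumerate ([] : List (List Char)) k = [] := rfl

lemma enum_cons (x : List Char) (t : List (List Char)) (k : Int) :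
    PySem.List.enumerate (x :: t) k = (k, x) :: PySem.List.enumerate t (k + 1) := rfl

lemma outer_fold (n : Int) :
    ∀ (ts : List (List Char)) (k : Int) (out : List Char),
      ts ≠ [] → k + ts.length = n →
      (PySem.List.enumerate ts k).foldl
          (fun out ct =>
            let out := ct.2.foldl
              (fun out char =>
                (if char = 'r' || char = 'R' then out ++ ['R', 'R', 'R'] else out) ++ [char]) out
            if ct.1 < n - 1 then out ++ [' '] else out) out
        = out ++ List.intercalate [' '] (ts.map (·.flatMap pirateTable)) := by
  intro ts
  induction ts with
  | nil => intro k out h _; exact absurd rfl h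
  | cons t rest ih =>
      intro k out _ hk
      cases rest with
      | nil =>
          rw [enum_cons, enum_nil, List.foldl_cons, List.foldl_nil]
          have hlt : ¬ k < n - 1 := by simp at hk; omega
          simp only [inner_fold, hlt, if_false]
          simp [intercalate_cons]
      | cons t2 rest2 =>
          rw [enum_cons, List.foldl_cons,
            ih (k + 1) _ (by simp) (by simp at hk ⊢; omega)]
          have hlt : k < n - 1 := by simp at hk; omega
          simp only [inner_fold, hlt, if_true]
          simp [intercalate_cons]

-- the table substitution distributes over joining with spaces (space maps to itself)
lemma flatMap_intercalate (parts : List (List Char)) :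
    (List.intercalate [' '] parts).flatMap pirateTable
      = List.intercalate [' '] (parts.map (·.flatMap pirateTable)) := by
  induction parts with
  | nil => simp [List.intercalate]
  | cons p rest ih =>
      cases rest with
      | nil => simp [List.intercalate]
      | cons q r2 =>
          rw [intercalate_cons, if_neg (List.cons_ne_nil _ _),
            List.flatMap_append, List.flatMap_append, ih]
          conv_rhs => rw [List.map_cons, List.map_cons, intercalate_cons,
            if_neg (List.cons_ne_nil _ _)]
          simp [pirateTable]

lemma pirateChars_eq (s : List Char) : pirateChars s = s.flatMap pirateTable := by
  unfold pirateChars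
  rw [outer_fold ((PySem.Chars.splitOn s [' ']).length : Int) _ 0 []
      (splitOn_ne_nil s [' ']) (by omega)]
  rw [← flatMap_intercalate, intercalate_splitOn s [' '] (by simp)]
  simp

-- ===== VERDICT (by name: the statement is the Claim_ definition above) =====
theorem pirate_spec : Claim_equal_pirate := by
  intro quote _
  unfold Spec_pirate pirate pirate_alt
  rw [pirateChars_eq]
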